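-- pv_equiv track=rewrite | github.com/rickypin/capmaster | capmaster/plugins/preprocess/pipeline.py | _optimise_steps
-- ===== SOURCE A (Python) =====
-- from typing import Callable, Iterable, List, Mapping, Sequence
--
-- STEP_TIME_ALIGN = "time-align"
--
-- STEP_DEDUP = "dedup"
--
-- STEP_TIME_ALIGN_DEDUP = "time-align+dedup"
--
-- StepName = str
--
-- def _optimise_steps(steps: Sequence[StepName]) -> list[StepName]:
--     """Apply internal step-sequence optimisations.
--
--     Currently this folds a consecutive ``time-align`` + ``dedup`` pair into a
--     single ``time-align+dedup`` step. External semantics remain unchanged;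
--     only the number of editcap passes over each file is reduced.
--     """
--
--     if not steps:
--         return []
--
--     optimised: list[StepName] = []
--     i = 0
--     n = len(steps)
--
--     while i < n:
--         current = steps[i]
--         nxt = steps[i + 1] if i + 1 < n else None
--
--         if current == STEP_TIME_ALIGN and nxt == STEP_DEDUP:
--             optimised.append(STEP_TIME_ALIGN_DEDUP)
--             i += 2
--             continue
--
--         optimised.append(current)
--         i += 1
--
--     return optimised
-- ===== SOURCE B (Python) =====
-- STEP_TIME_ALIGN = "time-align"
-- STEP_DEDUP = "dedup"
-- STEP_TIME_ALIGN_DEDUP = "time-align+dedup"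
--
-- def _optimise_steps(steps):
--     result = []
--     for step in steps:
--         if step == STEP_DEDUP and result and result[-1] == STEP_TIME_ALIGN:
--             result[-1] = STEP_TIME_ALIGN_DEDUP
--         else:
--             result.append(step)
--     return result
-- ===== Notes on version B (the rewrite author's own statement) =====
-- stated objective: simpler
-- what changed: Replaces the index-based while loop with lookahead and skip-by-two by a single backward-looking pass that uses the output list as a stack, rewriting its last element when a dedup follows an emitted time-align.
import Mathlib
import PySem

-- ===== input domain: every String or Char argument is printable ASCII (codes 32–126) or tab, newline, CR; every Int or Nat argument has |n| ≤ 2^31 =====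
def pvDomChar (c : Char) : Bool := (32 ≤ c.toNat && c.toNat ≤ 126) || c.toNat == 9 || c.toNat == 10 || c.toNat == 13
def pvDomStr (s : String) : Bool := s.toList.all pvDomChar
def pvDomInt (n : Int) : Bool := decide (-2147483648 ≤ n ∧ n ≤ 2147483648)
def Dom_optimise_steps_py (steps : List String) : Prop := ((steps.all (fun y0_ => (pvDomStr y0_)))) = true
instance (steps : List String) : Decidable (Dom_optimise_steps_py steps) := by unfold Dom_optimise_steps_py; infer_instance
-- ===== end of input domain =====

-- B changes the decomposition (lookback stack pass instead of index loop with lookahead); same cost, simpler.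

-- ===== PORT A =====
-- the while loop over index i, with nxt = steps[i+1] if it exists; merging consumes two elements
def pvGoA : List String → List String
  | [] => []
  | c :: rest =>
    if c = "time-align" ∧ rest.head? = some "dedup" then
      "time-align+dedup" :: pvGoA rest.tail
    else
      c :: pvGoA rest
  termination_by l => l.length
  decreasing_by
    all_goals simp [List.length_tail]

def optimise_steps_py (steps : List String) : List String :=
  if steps = [] then [] else pvGoA steps

-- ===== PORT B =====
-- one pass; result[-1] rewritten in place ≙ dropLast ++ [merged]
def pvStepB (res : List String) (s : String) : List String :=
  if s = "dedup" ∧ res ≠ [] ∧ res.getLast? = some "time-align" then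
    res.dropLast ++ ["time-align+dedup"]
  else
    res ++ [s]

def optimise_steps_py_alt (steps : List String) : List String :=
  steps.foldl pvStepB []

-- ===== PRECONDITION & SPEC =====
def Spec_optimise_steps_py (steps : List String) (out : List String) : Prop := out = optimise_steps_py_alt steps
instance (steps : List String) (out : List String) : Decidable (Spec_optimise_steps_py steps out) := by unfold Spec_optimise_steps_py; infer_instance

-- ===== CLAIM (what is proved, stated in full; the proofs are below) =====
def Claim_equal_optimise_steps_py : Prop := ∀ (steps : List String), Dom_optimise_steps_py steps → Spec_optimise_steps_py steps (optimise_steps_py steps)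

-- ===== LEMMAS AND PROOFS =====

theorem pvFold_goA (steps : List String) :
    ∀ acc : List String, ¬ (steps.head? = some "dedup" ∧ acc.getLast? = some "time-align") →
      steps.foldl pvStepB acc = acc ++ pvGoA steps := by
  induction steps using pvGoA.induct with
  | case1 => intro acc _; simp [pvGoA]
  | case2 c rest h ih =>
    intro acc _
    obtain ⟨hc, hd⟩ := h
    cases rest with
    | nil => simp at hd
    | cons nxt rest' =>
      simp at hd
      subst hc hd
      have h1 : pvStepB acc "time-align" = acc ++ ["time-align"] := by
        simp [pvStepB]
      have h2 : pvStepB (acc ++ ["time-align"]) "dedup"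
          = acc ++ ["time-align+dedup"] := by
        simp [pvStepB]
      rw [pvGoA]
      simp only [List.foldl, h1, h2]
      simp only [List.tail] at ih
      rw [ih (acc ++ ["time-align+dedup"]) (by simp)]
      simp
  | case3 c rest h ih =>
    intro acc hacc
    have h1 : pvStepB acc c = acc ++ [c] := by
      unfold pvStepB
      split
      · rename_i hsp
        exfalso
        obtain ⟨hcd, _, hlast⟩ := hsp
        exact hacc ⟨by simp [hcd], hlast⟩
      · rfl
    rw [pvGoA]
    simp only [List.foldl, h1]
    split
    · rename_i hm; exact absurd hm h
    · rw [ih (acc ++ [c]) ?_]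
      · simp
      · rintro ⟨hrd, hl⟩
        simp at hl
        exact h ⟨hl, hrd⟩

-- ===== VERDICT (by name: the statement is the Claim_ definition above) =====
theorem optimise_steps_py_spec : Claim_equal_optimise_steps_py := by
  intro steps _
  unfold Spec_optimise_steps_py optimise_steps_py optimise_steps_py_alt
  split
  · subst steps; rfl
  · rw [pvFold_goA steps [] (by simp)]; simp
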